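-- pv_equiv track=rewrite | github.com/btaczala/selfa-inverter-query | app/selfa_crypt.py | words_to_bytes
-- ===== SOURCE A (Python) =====
-- def words_to_bytes(words: bytes):
--     bytes_out = []
--     for i in range(len(words) * 4):
--         word_index = i // 4
--         shift = 24 - (i % 4) * 8
--         byte = (words[word_index] >> shift) & 0xFF
--         bytes_out.append(byte)
--     return bytes_out
-- ===== SOURCE B (Python) =====
-- def words_to_bytes(words: bytes):
--     rev = []
--     for w in reversed(words):
--         m = w % 4294967296
--         for _ in range(4):
--             m, b = divmod(m, 256)
--             rev.append(b)
--     rev.reverse()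
--     return rev
-- ===== Notes on version B (the rewrite author's own statement) =====
-- stated objective: alternative
-- what changed: Replaces the flat shift-and-mask loop over range(len(words)*4) (with i//4 and i%4 index arithmetic) by a back-to-front traversal that reduces each word modulo 2**32 and peels its bytes low-first with repeated divmod, reversing the accumulator once at the end.
import Mathlib
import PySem

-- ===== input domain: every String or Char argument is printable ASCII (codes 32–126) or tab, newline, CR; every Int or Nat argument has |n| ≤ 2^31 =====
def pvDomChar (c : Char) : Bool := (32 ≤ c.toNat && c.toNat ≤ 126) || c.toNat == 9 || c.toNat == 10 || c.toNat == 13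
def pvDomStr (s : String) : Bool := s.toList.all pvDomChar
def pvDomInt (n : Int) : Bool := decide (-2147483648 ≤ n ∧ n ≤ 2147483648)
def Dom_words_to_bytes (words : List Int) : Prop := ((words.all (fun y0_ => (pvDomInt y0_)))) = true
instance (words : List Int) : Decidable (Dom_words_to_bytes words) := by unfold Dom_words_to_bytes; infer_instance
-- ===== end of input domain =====

-- B replaces A's flat shift-and-mask index loop by arithmetic: it walks the words
-- back to front, peels each word's bytes low-first with divmod on w % 2^32, and
-- reverses once at the end — no bit operations and no index arithmetic.

-- ===== PORT A =====
def words_to_bytes (words : List Int) : List Int :=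
  (PySem.List.pyRange 0 ((words.length : Int) * 4) 1).foldl (fun bytes_out i =>
    let word_index := PySem.Int.floordiv i 4
    let shift := 24 - (PySem.Int.mod i 4) * 8
    let byte := PySem.Int.band (PySem.List.pyGetD words word_index 0 >>> shift.toNat) 0xFF
    bytes_out ++ [byte]) []

-- ===== PORT B =====
def words_to_bytes_alt (words : List Int) : List Int :=
  (words.reverse.foldl (fun rev w =>
      let m := PySem.Int.mod w 4294967296
      ((List.range 4).foldl
        (fun (st : Int × List Int) _ =>
          (PySem.Int.floordiv st.1 256, st.2 ++ [PySem.Int.mod st.1 256])) (m, rev)).2)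
    []).reverse

-- ===== PRECONDITION & SPEC =====
def Spec_words_to_bytes (words : List Int) (out : List Int) : Prop := out = words_to_bytes_alt words
instance (words : List Int) (out : List Int) : Decidable (Spec_words_to_bytes words out) := by unfold Spec_words_to_bytes; infer_instance

-- ===== CLAIM (what is proved, stated in full; the proofs are below) =====
def Claim_equal_words_to_bytes : Prop := ∀ (words : List Int), Dom_words_to_bytes words → Spec_words_to_bytes words (words_to_bytes words)

-- ===== LEMMAS AND PROOFS =====

/-- The four bytes of one word, most significant first (A's per-word contribution). -/
def pvWordBytes (w : Int) : List Int :=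
  [PySem.Int.band (w >>> (24:Nat)) 0xFF, PySem.Int.band (w >>> (16:Nat)) 0xFF,
   PySem.Int.band (w >>> (8:Nat)) 0xFF, PySem.Int.band w 0xFF]

/-- A's per-index byte. -/
def pvByteA (ws : List Int) (i : Int) : Int :=
  PySem.Int.band (PySem.List.pyGetD ws (PySem.Int.floordiv i 4) 0 >>> (24 - (PySem.Int.mod i 4) * 8).toNat) 0xFF

/-- B's per-word contribution: the four bytes of w % 2^32, LOW byte first. -/
def pvLowBytes (w : Int) : List Int :=
  let m := PySem.Int.mod w 4294967296
  [PySem.Int.mod m 256,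
   PySem.Int.mod (PySem.Int.floordiv m 256) 256,
   PySem.Int.mod (PySem.Int.floordiv (PySem.Int.floordiv m 256) 256) 256,
   PySem.Int.mod (PySem.Int.floordiv (PySem.Int.floordiv (PySem.Int.floordiv m 256) 256) 256) 256]

theorem pvA_eq_flatMap (ws : List Int) :
    (PySem.List.pyRange 0 ((ws.length : Int) * 4) 1).map (pvByteA ws)
      = ws.flatMap pvWordBytes := by
  induction ws using List.reverseRecOn with
  | nil => simp [PySem.List.pyRange_one_eq_nil]
  | append_singleton ws w ih =>
    have hn : ((ws.length + 1 : Nat) : Int) * 4 = (ws.length : Int) * 4 + 4 := by push_cast; ring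
    rw [List.length_append, List.length_singleton, hn,
        PySem.List.pyRange_one_append 0 ((ws.length : Int) * 4) ((ws.length : Int) * 4 + 4)
          (by positivity) (by omega),
        List.map_append]
    have hfirst : (PySem.List.pyRange 0 ((ws.length : Int) * 4) 1).map (pvByteA (ws ++ [w]))
        = (PySem.List.pyRange 0 ((ws.length : Int) * 4) 1).map (pvByteA ws) := by
      apply List.map_congr_left
      intro i hi
      rw [PySem.List.mem_pyRange_one] at hi
      unfold pvByteA
      have h4 : PySem.Int.floordiv i 4 = i / 4 := PySem.Int.floordiv_eq_ediv_of_pos (by norm_num)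
      have hq0 : 0 ≤ i / 4 := by omega
      have hqn : i / 4 < (ws.length : Int) := by omega
      rw [h4, PySem.List.pyGetD_eq_getElem (ws ++ [w]) 0 hq0 (by simp; omega),
          PySem.List.pyGetD_eq_getElem ws 0 hq0 (by simpa using hqn),
          List.getElem_append_left (by omega)]
    rw [hfirst, ih]
    have hrest : PySem.List.pyRange ((ws.length : Int) * 4) ((ws.length : Int) * 4 + 4) 1
        = [(ws.length : Int) * 4, (ws.length : Int) * 4 + 1,
           (ws.length : Int) * 4 + 2, (ws.length : Int) * 4 + 3] := by
      rw [PySem.List.pyRange_one_cons (by omega), PySem.List.pyRange_one_cons (by omega),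
          PySem.List.pyRange_one_cons (by omega), PySem.List.pyRange_one_cons (by omega),
          PySem.List.pyRange_one_eq_nil (by omega)]
      norm_num
      omega
    have hw : ∀ r : Int, 0 ≤ r → r < 4 →
        pvByteA (ws ++ [w]) ((ws.length : Int) * 4 + r)
          = PySem.Int.band (w >>> (24 - r * 8).toNat) 0xFF := by
      intro r hr0 hr4
      unfold pvByteA
      have hq : PySem.Int.floordiv ((ws.length : Int) * 4 + r) 4 = (ws.length : Int) := by
        rw [PySem.Int.floordiv_eq_ediv_of_pos (by norm_num)]; omega
      have hm : PySem.Int.mod ((ws.length : Int) * 4 + r) 4 = r := by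
        rw [PySem.Int.mod_eq_emod_of_pos (by norm_num)]; omega
      rw [hq, hm, PySem.List.pyGetD_eq_getElem (ws ++ [w]) 0 (by positivity) (by simp)]
      congr 1
      simp [List.getElem_append_right]
    have e0 : pvByteA (ws ++ [w]) ((ws.length : Int) * 4) = PySem.Int.band (w >>> (24:Nat)) 0xFF := by
      have h := hw 0 (by norm_num) (by norm_num); norm_num at h; simpa using h
    have e1 : pvByteA (ws ++ [w]) ((ws.length : Int) * 4 + 1) = PySem.Int.band (w >>> (16:Nat)) 0xFF := by
      have h := hw 1 (by norm_num) (by norm_num); norm_num at h; simpa using h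
    have e2 : pvByteA (ws ++ [w]) ((ws.length : Int) * 4 + 2) = PySem.Int.band (w >>> (8:Nat)) 0xFF := by
      have h := hw 2 (by norm_num) (by norm_num); norm_num at h; simpa using h
    have e3 : pvByteA (ws ++ [w]) ((ws.length : Int) * 4 + 3) = PySem.Int.band w 0xFF := by
      have h := hw 3 (by norm_num) (by norm_num); norm_num at h; simpa using h
    rw [hrest]
    simp only [List.map_cons, List.map_nil, e0, e1, e2, e3]
    simp [pvWordBytes]

/-- Python's `x & 0xFF` is `x mod 256` (also on negatives). -/
theorem pv_band255 (x : Int) : PySem.Int.band x 255 = x % 256 := by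
  unfold PySem.Int.band
  split_ifs with h h2 h2
  · have e : x.toNat &&& Int.toNat 255 = x.toNat % 256 := Nat.and_two_pow_sub_one_eq_mod x.toNat 8
    rw [e, Int.natCast_mod, Int.toNat_of_nonneg h]; rfl
  · omega
  · have e : Int.toNat 255 &&& (-x - 1).toNat = (-x - 1).toNat % 256 := by
      rw [Nat.and_comm]; exact Nat.and_two_pow_sub_one_eq_mod _ 8
    rw [e]
    have hc : ((-x-1).toNat % 256 : Int) = 255 - x % 256 := by
      rw [Int.toNat_of_nonneg (by omega)]
      omega
    omega
  · omega

/-- B's inner `for _ in range(4)` divmod loop, unfolded. -/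
theorem pv_inner_eq (m : Int) (rev : List Int) :
    ((List.range 4).foldl
      (fun (st : Int × List Int) _ =>
        (PySem.Int.floordiv st.1 256, st.2 ++ [PySem.Int.mod st.1 256])) (m, rev)).2
    = rev ++ [PySem.Int.mod m 256,
              PySem.Int.mod (PySem.Int.floordiv m 256) 256,
              PySem.Int.mod (PySem.Int.floordiv (PySem.Int.floordiv m 256) 256) 256,
              PySem.Int.mod (PySem.Int.floordiv (PySem.Int.floordiv (PySem.Int.floordiv m 256) 256) 256) 256] := by
  rw [show List.range 4 = [0, 1, 2, 3] from rfl]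
  simp [List.foldl]

/-- B's outer loop is a flatMap of per-word low-first byte lists. -/
theorem pvB_flatMap (ws : List Int) (acc : List Int) :
    ws.foldl (fun rev w =>
      let m := PySem.Int.mod w 4294967296
      ((List.range 4).foldl
        (fun (st : Int × List Int) _ =>
          (PySem.Int.floordiv st.1 256, st.2 ++ [PySem.Int.mod st.1 256])) (m, rev)).2) acc
    = acc ++ ws.flatMap pvLowBytes := by
  induction ws generalizing acc with
  | nil => simp
  | cons w ws ih =>
    rw [List.foldl_cons]
    simp only []
    rw [pv_inner_eq, ih]
    simp [pvLowBytes, List.append_assoc]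

/-- Per word, B's low-first divmod bytes reversed are A's shift-and-mask bytes. -/
theorem pvLowBytes_reverse (w : Int) : (pvLowBytes w).reverse = pvWordBytes w := by
  unfold pvLowBytes pvWordBytes
  have hm : PySem.Int.mod w 4294967296 = w % 4294967296 :=
    Int.fmod_eq_emod_of_nonneg w (by norm_num)
  have hfd : ∀ x : Int, PySem.Int.floordiv x 256 = x / 256 := fun x =>
    PySem.Int.floordiv_eq_ediv_of_pos (by norm_num)
  have hmod : ∀ x : Int, PySem.Int.mod x 256 = x % 256 := fun x =>
    Int.fmod_eq_emod_of_nonneg x (by norm_num)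
  have hs : ∀ n : Nat, w >>> n = w / ((2:Int) ^ n) := by
    intro n; rw [Int.shiftRight_eq_div_pow]; norm_num
  simp only [hm, hfd, hmod, List.reverse_cons, List.reverse_nil, List.nil_append,
    List.cons_append, pv_band255, hs 24, hs 16, hs 8]
  norm_num
  omega

/-- B computes the same flatMap as A. -/
theorem pvB_eq_flatMap (ws : List Int) :
    words_to_bytes_alt ws = ws.flatMap pvWordBytes := by
  unfold words_to_bytes_alt
  rw [pvB_flatMap, List.nil_append, List.reverse_flatMap, List.reverse_reverse]
  simp only [Function.comp_def, pvLowBytes_reverse]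

-- ===== VERDICT (by name: the statement is the Claim_ definition above) =====
theorem words_to_bytes_spec : Claim_equal_words_to_bytes := by
  intro words _
  unfold Spec_words_to_bytes words_to_bytes
  rw [PySem.List.foldl_append_singleton_eq_map, pvB_eq_flatMap]
  exact pvA_eq_flatMap words
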